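-- pv_equiv track=rewrite | github.com/jafingerhut/p4-guide | linux-file-access-tracking/files-accessed-from-list.py | suffixes_of
-- ===== SOURCE A (Python) =====
-- def suffixes_of(path):
--     segments = path.split('/')
--     if segments[0] == "":
--         segments = segments[1:]
--     ret = []
--     for j in range(1, len(segments)):
--         suffix = '/'.join(segments[j:])
--         ret.append(suffix)
--     return ret
-- ===== SOURCE B (Python) =====
-- def suffixes_of(path):
--     # Same split-and-strip preamble as A, then one right-to-left pass with a
--     # running suffix accumulator instead of re-joining a slice per index.
--     segments = path.split('/')
--     if segments[0] == "":
--         segments = segments[1:]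
--     out = []
--     suffix = None
--     for seg in reversed(segments[1:]):
--         suffix = seg if suffix is None else seg + '/' + suffix
--         out.append(suffix)
--     out.reverse()
--     return out
-- ===== Notes on version B (the rewrite author's own statement) =====
-- stated objective: alternative
-- what changed: Replaces A's per-index slicing and re-joining of segments with a single right-to-left pass extending a running suffix string, then reversing the collected list.
import Mathlib
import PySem

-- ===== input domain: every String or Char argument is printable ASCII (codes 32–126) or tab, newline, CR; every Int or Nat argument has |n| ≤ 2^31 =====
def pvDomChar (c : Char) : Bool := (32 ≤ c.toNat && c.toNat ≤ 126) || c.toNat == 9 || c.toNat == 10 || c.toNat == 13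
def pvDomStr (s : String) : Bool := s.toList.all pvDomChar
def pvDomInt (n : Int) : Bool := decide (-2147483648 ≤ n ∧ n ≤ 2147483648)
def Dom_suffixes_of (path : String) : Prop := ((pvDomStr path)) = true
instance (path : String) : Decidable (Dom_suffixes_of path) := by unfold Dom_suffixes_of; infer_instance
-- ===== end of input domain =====

-- B replaces A's per-index slicing and re-joining with one right-to-left pass extending a
-- running suffix accumulator, then reverses the collected list (objective: alternative).

-- ===== PORT A =====
def suffixes_of (path : String) : List String :=
  let segments := (PySem.Chars.splitOn path.toList ['/']).map String.ofList
  let segments := if PySem.List.pyGetD segments 0 "" = "" then PySem.List.slice segments (some 1) none else segments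
  (PySem.List.pyRange 1 segments.length 1).foldl
    (fun ret j => ret ++ [PySem.Str.join "/" (PySem.List.slice segments (some j) none)]) []

-- ===== PORT B =====
def suffixes_of_alt (path : String) : List String :=
  let segments := (PySem.Chars.splitOn path.toList ['/']).map String.ofList
  let segments := if PySem.List.pyGetD segments 0 "" = "" then PySem.List.slice segments (some 1) none else segments
  let acc := (PySem.List.slice segments (some 1) none).reverse.foldl
      (fun (acc : List String × Option String) seg =>
        let suffix := match acc.2 with | none => seg | some s => seg ++ "/" ++ s
        (acc.1 ++ [suffix], some suffix)) ([], none)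
  acc.1.reverse

-- ===== PRECONDITION & SPEC =====
def Spec_suffixes_of (path : String) (out : List String) : Prop := out = suffixes_of_alt path
instance (path : String) (out : List String) : Decidable (Spec_suffixes_of path out) := by unfold Spec_suffixes_of; infer_instance

-- ===== CLAIM (what is proved, stated in full; the proofs are below) =====
def Claim_equal_suffixes_of : Prop := ∀ (path : String), Dom_suffixes_of path → Spec_suffixes_of path (suffixes_of path)

-- ===== LEMMAS AND PROOFS =====

-- '/'.join of a list with at least two elements peels off its head
theorem join_cons_cons (s t : String) (ts : List String) :
    PySem.Str.join "/" (s :: t :: ts) = s ++ "/" ++ PySem.Str.join "/" (t :: ts) := by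
  apply String.toList_injective
  simp only [PySem.Str.toList_join, String.toList_append, List.map_cons]
  simp [PySem.Chars.join, List.intercalate, List.intersperse]

theorem join_cons_ne (x : String) (l : List String) (h : l ≠ []) :
    PySem.Str.join "/" (x :: l) = x ++ "/" ++ PySem.Str.join "/" l := by
  cases l with
  | nil => exact absurd rfl h
  | cons a as => exact join_cons_cons x a as

theorem join_singleton' (s : String) : PySem.Str.join "/" [s] = s := by
  apply String.toList_injective
  simp [PySem.Str.toList_join, PySem.Chars.join, List.intercalate]

-- range(1, n) in closed form
theorem pyRange_one_n (n : Nat) :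
    PySem.List.pyRange 1 (n : Int) 1 = (List.range (n - 1)).map (fun k => ((1 + k : Nat) : Int)) := by
  simp only [PySem.List.pyRange]
  norm_num
  split_ifs with h
  · rfl
  · have h0 : n - 1 = 0 := by omega
    simp [h0]

-- B's right-to-left fold characterised: the collected list and the running suffix
theorem foldB_eq (r : List String) :
    r.foldl
      (fun (acc : List String × Option String) seg =>
        let suffix := match acc.2 with | none => seg | some s => seg ++ "/" ++ s
        (acc.1 ++ [suffix], some suffix)) ([], none)
    = ((List.range r.length).map (fun i => PySem.Str.join "/" ((r.take (i+1)).reverse)),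
       if r = [] then none else some (PySem.Str.join "/" r.reverse)) := by
  induction r using List.reverseRecOn with
  | nil => simp
  | append_singleton r' x ih =>
    rw [List.foldl_append, ih]
    simp only [List.foldl_cons, List.foldl_nil]
    have hJ : PySem.Str.join "/" ((r' ++ [x]).reverse) =
        match (if r' = [] then (none : Option String) else some (PySem.Str.join "/" r'.reverse)) with
        | none => x | some s => x ++ "/" ++ s := by
      by_cases h : r' = []
      · simp [h, join_singleton']
      · rw [if_neg h]
        rw [List.reverse_append, List.reverse_singleton, List.singleton_append]
        exact join_cons_ne x r'.reverse (by simpa using h)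
    rw [← hJ]
    simp only [Prod.mk.injEq]
    refine ⟨?_, by simp⟩
    rw [List.length_append, List.length_singleton, List.range_succ, List.map_append,
      List.map_singleton]
    congr 1
    · apply List.map_congr_left
      intro i hi
      rw [List.mem_range] at hi
      rw [List.take_append_of_le_length (by omega)]
    · rw [List.take_of_length_le (by simp)]

theorem reverse_map_range {β : Type} (m : Nat) (f : Nat → β) :
    ((List.range m).map f).reverse = (List.range m).map (fun k => f (m - 1 - k)) := by
  apply List.ext_getElem
  · simp
  · intro i h1 h2
    simp only [List.getElem_reverse, List.length_map, List.length_range, List.getElem_map,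
      List.getElem_range]

-- the two loop bodies agree for ANY stripped segment list (the split/strip preamble is shared)
theorem suffixes_core (segs : List String) :
    (PySem.List.pyRange 1 segs.length 1).foldl
      (fun ret j => ret ++ [PySem.Str.join "/" (PySem.List.slice segs (some j) none)]) []
    = ((PySem.List.slice segs (some 1) none).reverse.foldl
        (fun (acc : List String × Option String) seg =>
          let suffix := match acc.2 with | none => seg | some s => seg ++ "/" ++ s
          (acc.1 ++ [suffix], some suffix)) ([], none)).1.reverse := by
  rw [foldB_eq]
  rw [PySem.List.foldl_append_singleton_eq_map, List.nil_append]
  rw [pyRange_one_n, List.map_map]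
  rw [PySem.List.slice_from segs (by norm_num : (0:Int) ≤ 1)]
  have hlen : (segs.drop (1:Int).toNat).length = segs.length - 1 := by simp
  simp only [List.length_reverse, hlen]
  rw [reverse_map_range]
  apply List.map_congr_left
  intro k hk
  rw [List.mem_range] at hk
  simp only [Function.comp_apply]
  rw [PySem.List.slice_from segs (by positivity : (0:Int) ≤ ((1 + k : Nat) : Int))]
  congr 1
  rw [List.take_reverse, List.reverse_reverse]
  rw [show (((1 + k : Nat) : Int)).toNat = 1 + k from by omega]
  rw [show segs.drop (1 + k) = (segs.drop (1:Int).toNat).drop k from by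
    simp; ring_nf]
  rw [hlen]
  congr 1
  omega

-- ===== VERDICT (by name: the statement is the Claim_ definition above) =====
theorem suffixes_of_spec : Claim_equal_suffixes_of := by
  intro path _
  unfold Spec_suffixes_of suffixes_of suffixes_of_alt
  exact suffixes_core _
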